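-- pv_equiv track=rewrite | github.com/godelclaw/ai-agents | lean-projects/algorithms/gf_fragments/export_paper_ambiguity_ir.py | tokenize_surface
-- ===== SOURCE A (Python) =====
-- def tokenize_surface(surface: str) -> list[str]:
--     toks = []
--     curr = []
--     for ch in surface:
--         if ch.isalnum() or ch in "'_":
--             curr.append(ch.lower())
--         else:
--             if curr:
--                 toks.append(''.join(curr))
--                 curr = []
--     if curr:
--         toks.append(''.join(curr))
--     return toks
-- ===== SOURCE B (Python) =====
-- def tokenize_surface(surface: str) -> list[str]:
--     def is_tok(ch):
--         return ch.isalnum() or ch in "'_"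
--     toks = []
--     i, n = 0, len(surface)
--     while i < n:
--         if is_tok(surface[i]):
--             j = i
--             while j < n and is_tok(surface[j]):
--                 j += 1
--             toks.append(surface[i:j].lower())
--             i = j
--         else:
--             i += 1
--     return toks
-- ===== Notes on version B (the rewrite author's own statement) =====
-- stated objective: alternative
-- what changed: B scans by spans: it finds each maximal run of token characters with an inner index advance and lowercases/appends the whole slice at once, instead of A's single pass that accumulates characters one by one into a pending buffer and flushes it at separators and at the end.
import Mathlib
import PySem

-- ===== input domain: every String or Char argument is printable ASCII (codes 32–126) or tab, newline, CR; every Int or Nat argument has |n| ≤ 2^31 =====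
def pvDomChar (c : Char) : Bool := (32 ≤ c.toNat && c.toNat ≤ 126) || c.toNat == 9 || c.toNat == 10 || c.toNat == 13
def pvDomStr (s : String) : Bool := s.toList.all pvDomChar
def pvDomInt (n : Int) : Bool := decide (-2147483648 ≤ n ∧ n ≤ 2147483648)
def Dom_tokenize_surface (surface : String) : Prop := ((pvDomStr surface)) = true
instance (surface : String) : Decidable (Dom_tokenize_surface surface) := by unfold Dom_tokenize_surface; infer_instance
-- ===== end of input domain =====

-- B replaces A's char-by-char buffer accumulation with a span scan over maximal token runs
-- (alternative decomposition, same O(n) cost).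

-- shared predicate: ch.isalnum() or ch in "'_"
def pvIsTok (ch : Char) : Bool := PySem.Chars.isalnum ch || "'_".toList.contains ch

-- ===== PORT A =====
-- A's loop state: (toks, curr); flush curr at each non-token char and once at the end.
def pvStepA (st : List String × List Char) (ch : Char) : List String × List Char :=
  if pvIsTok ch then
    (st.1, st.2 ++ [PySem.Chars.lowerChar ch])
  else
    if st.2 ≠ [] then (st.1 ++ [String.ofList st.2], []) else st

def tokenize_surface (surface : String) : List String :=
  let st := surface.toList.foldl pvStepA ([], [])
  if st.2 ≠ [] then st.1 ++ [String.ofList st.2] else st.1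

-- ===== PORT B =====
-- B's outer while-loop: skip a non-token char, or take the whole maximal token run
-- (inner while = takeWhile), lowercase the slice at once, and continue after it.
def pvSpanB : List Char → List String
  | [] => []
  | c :: cs =>
    if pvIsTok c then
      String.ofList (PySem.Chars.lower (List.takeWhile pvIsTok (c :: cs)))
        :: pvSpanB (List.dropWhile pvIsTok (c :: cs))
    else pvSpanB cs
termination_by cs => cs.length
decreasing_by
  all_goals rename_i h
  · simp only [List.dropWhile_cons, h, if_pos]
    exact Nat.lt_succ_of_le (List.length_dropWhile_le _ _)
  · simp

def tokenize_surface_alt (surface : String) : List String := pvSpanB surface.toList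

-- ===== PRECONDITION & SPEC =====
def Spec_tokenize_surface (surface : String) (out : List String) : Prop := out = tokenize_surface_alt surface
instance (surface : String) (out : List String) : Decidable (Spec_tokenize_surface surface out) := by unfold Spec_tokenize_surface; infer_instance

-- ===== CLAIM (what is proved, stated in full; the proofs are below) =====
def Claim_equal_tokenize_surface : Prop := ∀ (surface : String), Dom_tokenize_surface surface → Spec_tokenize_surface surface (tokenize_surface surface)

-- ===== LEMMAS AND PROOFS =====

-- finish step of A
def pvFinishA (st : List String × List Char) : List String :=
  if st.2 ≠ [] then st.1 ++ [String.ofList st.2] else st.1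

-- intermediate semantics of A's loop with pending buffer curr
def pvSpanWith : List Char → List Char → List String
  | curr, [] => if curr ≠ [] then [String.ofList curr] else []
  | curr, c :: cs =>
    if pvIsTok c then pvSpanWith (curr ++ [PySem.Chars.lowerChar c]) cs
    else (if curr ≠ [] then [String.ofList curr] else []) ++ pvSpanWith [] cs

@[simp] lemma pvSpanB_nil : pvSpanB [] = [] := by rw [pvSpanB.eq_def]

lemma pvSpanB_cons (c : Char) (cs : List Char) :
    pvSpanB (c :: cs) =
      if pvIsTok c then
        String.ofList (PySem.Chars.lower (List.takeWhile pvIsTok (c :: cs)))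
          :: pvSpanB (List.dropWhile pvIsTok (c :: cs))
      else pvSpanB cs := by
  rw [pvSpanB.eq_def]

lemma pvFoldA_eq_spanWith (cs : List Char) : ∀ (toks : List String) (curr : List Char),
    pvFinishA (cs.foldl pvStepA (toks, curr)) = toks ++ pvSpanWith curr cs := by
  induction cs with
  | nil =>
    intro toks curr
    by_cases hc : curr = [] <;> simp [pvFinishA, pvSpanWith, hc]
  | cons c cs ih =>
    intro toks curr
    simp only [List.foldl_cons, pvSpanWith, pvStepA]
    by_cases h : pvIsTok c = true
    · simp [h, ih]
    · simp only [if_neg h]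
      by_cases hc : curr = []
      · simp [hc, ih]
      · simp [hc, ih, List.append_assoc]

-- both characterisations of pvSpanWith, by one strong induction on the tail's length
lemma pvSpanWith_char (n : ℕ) : ∀ (cs : List Char), cs.length ≤ n →
    (pvSpanWith [] cs = pvSpanB cs) ∧
    (∀ curr : List Char, curr ≠ [] →
      pvSpanWith curr cs =
        String.ofList (curr ++ PySem.Chars.lower (List.takeWhile pvIsTok cs))
          :: pvSpanB (List.dropWhile pvIsTok cs)) := by
  induction n with
  | zero =>
    intro cs hlen
    have hnil : cs = [] := by cases cs <;> simp_all
    subst hnil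
    refine ⟨by simp [pvSpanWith], ?_⟩
    intro curr hc
    simp [pvSpanWith, hc, PySem.Chars.lower]
  | succ n ih =>
    intro cs hlen
    cases cs with
    | nil =>
      refine ⟨by simp [pvSpanWith], ?_⟩
      intro curr hc
      simp [pvSpanWith, hc, PySem.Chars.lower]
    | cons c cs =>
      have hcs : cs.length ≤ n := by simpa using hlen
      by_cases h : pvIsTok c = true
      · constructor
        · -- empty buffer, token head: the buffer becomes [lowerChar c]
          rw [pvSpanWith, if_pos h, pvSpanB_cons, if_pos h]
          have := (ih cs hcs).2 [PySem.Chars.lowerChar c] (by simp)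
          simp only [List.nil_append] at this ⊢
          rw [this]
          simp [List.takeWhile, List.dropWhile, h, PySem.Chars.lower]
        · intro curr hc
          rw [pvSpanWith, if_pos h]
          rw [(ih cs hcs).2 (curr ++ [PySem.Chars.lowerChar c]) (by simp)]
          simp [List.takeWhile, List.dropWhile, h, PySem.Chars.lower]
      · constructor
        · rw [pvSpanWith, if_neg h, pvSpanB_cons, if_neg h]
          simp [(ih cs hcs).1]
        · intro curr hc
          rw [pvSpanWith, if_neg h]
          simp [h, hc, (ih cs hcs).1,
                pvSpanB_cons, PySem.Chars.lower]

-- ===== VERDICT (by name: the statement is the Claim_ definition above) =====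
theorem tokenize_surface_spec : Claim_equal_tokenize_surface := by
  intro surface _
  unfold Spec_tokenize_surface tokenize_surface tokenize_surface_alt
  show pvFinishA (surface.toList.foldl pvStepA ([], [])) = _
  rw [pvFoldA_eq_spanWith]
  simp [(pvSpanWith_char surface.toList.length surface.toList le_rfl).1]
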